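-- pv_equiv track=rewrite | github.com/descawed/galsdk | psx/cd/disc.py | to_bcd
-- ===== SOURCE A (Python) =====
-- def to_bcd(value: int) -> int:
--     out = 0
--     shift = 0
--     while value > 0:
--         digit = value % 10
--         out |= digit << shift
--         shift += 4
--         value //= 10
--     return out
-- ===== SOURCE B (Python) =====
-- def to_bcd(value: int) -> int:
--     if value <= 0:
--         return 0
--     out = 0
--     for ch in str(value):
--         out = (out << 4) | (ord(ch) - 48)
--     return out
-- ===== Notes on version B (the rewrite author's own statement) =====
-- stated objective: alternative
-- what changed: B converts via the decimal string: it walks str(value) MSB-first packing one nibble per character, instead of A's LSB-first arithmetic loop that extracts digits by repeated modulo/floor-division and ors them in at a growing shift.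
import Mathlib
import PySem

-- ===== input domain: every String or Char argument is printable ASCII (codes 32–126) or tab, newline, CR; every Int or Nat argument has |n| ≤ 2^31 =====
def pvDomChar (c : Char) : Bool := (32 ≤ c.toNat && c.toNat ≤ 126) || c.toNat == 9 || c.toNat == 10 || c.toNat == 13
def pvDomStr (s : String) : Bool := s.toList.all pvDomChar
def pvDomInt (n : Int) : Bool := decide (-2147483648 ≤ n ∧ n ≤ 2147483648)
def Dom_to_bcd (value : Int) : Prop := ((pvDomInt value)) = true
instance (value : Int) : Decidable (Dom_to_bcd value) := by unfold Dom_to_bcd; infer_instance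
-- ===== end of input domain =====

-- B packs the decimal string of value MSB-first, one nibble per character, instead of
-- A's LSB-first modulo/floor-division loop; same return value everywhere (alternative, not faster).

-- ===== PORT A =====
-- while value > 0: digit = value % 10; out |= digit << shift; shift += 4; value //= 10
def to_bcd_loop (value out : Int) (shift : Nat) : Int :=
  if h : value > 0 then
    to_bcd_loop (PySem.Int.floordiv value 10)
      (PySem.Int.bor out (PySem.Int.mod value 10 <<< shift)) (shift + 4)
  else out
termination_by value.toNat
decreasing_by
  simp only [PySem.Int.floordiv]
  rw [Int.fdiv_eq_ediv]
  norm_num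
  omega

def to_bcd (value : Int) : Int := to_bcd_loop value 0 0

-- ===== PORT B =====
-- if value <= 0: return 0; for ch in str(value): out = (out << 4) | (ord(ch) - 48)
def to_bcd_alt (value : Int) : Int :=
  if value ≤ 0 then 0
  else (PySem.Int.toStr value).toList.foldl
    (fun out c => PySem.Int.bor (out <<< (4 : Nat)) ((c.toNat : Int) - 48)) 0

-- ===== PRECONDITION & SPEC =====
def Spec_to_bcd (value : Int) (out : Int) : Prop := out = to_bcd_alt value
instance (value : Int) (out : Int) : Decidable (Spec_to_bcd value out) := by unfold Spec_to_bcd; infer_instance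

-- ===== CLAIM (what is proved, stated in full; the proofs are below) =====
def Claim_equal_to_bcd : Prop := ∀ (value : Int), Dom_to_bcd value → Spec_to_bcd value (to_bcd value)

-- ===== LEMMAS AND PROOFS =====

-- the packed-BCD value of a natural number, LSB-recursive model
def pvBcd : Nat → Nat
  | 0 => 0
  | n + 1 => pvBcd ((n + 1) / 10) * 16 + (n + 1) % 10
decreasing_by exact Nat.div_lt_self (Nat.succ_pos n) (by norm_num)

theorem pvBcd_pos (n : Nat) (h : 0 < n) : pvBcd n = pvBcd (n / 10) * 16 + n % 10 := by
  cases n with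
  | zero => omega
  | succ k => rw [pvBcd]

theorem pvBcd_lt10 (n : Nat) (h : n < 10) : pvBcd n = n := by
  cases n with
  | zero => simp [pvBcd]
  | succ k =>
    rw [pvBcd, Nat.div_eq_of_lt h, Nat.mod_eq_of_lt h]
    simp [pvBcd]

-- ---- A-side: the loop computes pvBcd ----

theorem to_bcd_loop_eq (n : Nat) : ∀ (v : Int), v.toNat = n → ∀ (o s : Nat), o < 2 ^ s →
    to_bcd_loop (v : Int) (o : Int) s = ((o + pvBcd v.toNat * 2 ^ s : Nat) : Int) := by
  induction n using Nat.strong_induction_on with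
  | _ n ih =>
    intro v hv o s ho
    rw [to_bcd_loop]
    by_cases hvpos : v > 0
    · simp only [hvpos, dif_pos]
      have hm : ((v.toNat : Int)) = v := Int.toNat_of_nonneg (by omega)
      have hdiv : PySem.Int.floordiv v 10 = ((v.toNat / 10 : Nat) : Int) := by
        simp only [PySem.Int.floordiv]
        rw [Int.fdiv_eq_ediv]
        norm_num
        omega
      have hmod : PySem.Int.mod v 10 = ((v.toNat % 10 : Nat) : Int) := by
        simp only [PySem.Int.mod]
        rw [Int.fmod_eq_emod]
        norm_num
        omega
      have hbor : PySem.Int.bor (o : Int) (((v.toNat % 10 : Nat) : Int) <<< s)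
          = ((o + (v.toNat % 10) * 2 ^ s : Nat) : Int) := by
        rw [← Int.natCast_shiftLeft]
        simp only [PySem.Int.bor, Int.natCast_nonneg, if_pos, Int.toNat_natCast]
        rw [Nat.or_comm, ← Nat.shiftLeft_add_eq_or_of_lt ho, Nat.shiftLeft_eq]
        push_cast
        ring
      rw [hdiv, hmod, hbor]
      have hlt : (v.toNat / 10) < n := by omega
      rw [ih _ hlt ((v.toNat / 10 : Nat) : Int) (Int.toNat_natCast _) _ (s + 4)
        (by
          have h9 : v.toNat % 10 < 10 := Nat.mod_lt _ (by norm_num)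
          have : o + v.toNat % 10 * 2 ^ s < 16 * 2 ^ s := by nlinarith
          calc o + v.toNat % 10 * 2 ^ s < 16 * 2 ^ s := this
            _ = 2 ^ (s + 4) := by ring)]
      congr 1
      rw [pvBcd_pos v.toNat (by omega)]
      simp only [Int.toNat_natCast]
      ring
    · simp only [hvpos, dif_neg, not_false_iff]
      have : v.toNat = 0 := by omega
      rw [this]
      simp [pvBcd]

theorem to_bcd_eq (v : Int) : to_bcd v = ((pvBcd v.toNat : Nat) : Int) := by
  have := to_bcd_loop_eq v.toNat v rfl 0 0 (by norm_num)
  simpa [to_bcd] using this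

-- ---- B-side: folding over the decimal digit string computes pvBcd ----

theorem tdc_append (b : Nat) : ∀ (f n : Nat) (l : List Char),
    Nat.toDigitsCore b f n l = Nat.toDigitsCore b f n [] ++ l := by
  intro f
  induction f with
  | zero => intro n l; simp [Nat.toDigitsCore]
  | succ f ih =>
    intro n l
    simp only [Nat.toDigitsCore]
    by_cases h : n / b = 0
    · simp [h]
    · simp only [h, if_neg, not_false_iff]
      rw [ih (n / b) ((n % b).digitChar :: l), ih (n / b) [(n % b).digitChar]]
      simp

theorem tdc_fuel (b : Nat) (hb : 2 ≤ b) : ∀ (n f1 f2 : Nat), n < f1 → n < f2 →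
    Nat.toDigitsCore b f1 n [] = Nat.toDigitsCore b f2 n [] := by
  intro n
  induction n using Nat.strong_induction_on with
  | _ n ih =>
    intro f1 f2 h1 h2
    obtain ⟨g1, rfl⟩ : ∃ g1, f1 = g1 + 1 := ⟨f1 - 1, by omega⟩
    obtain ⟨g2, rfl⟩ : ∃ g2, f2 = g2 + 1 := ⟨f2 - 1, by omega⟩
    simp only [Nat.toDigitsCore]
    by_cases h : n / b = 0
    · simp [h]
    · simp only [h, if_neg, not_false_iff]
      have hnb : n / b < n := Nat.div_lt_self (by
        rcases Nat.eq_zero_or_pos n with h0 | h0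
        · exfalso; apply h; simp [h0]
        · exact h0) (by omega)
      rw [tdc_append b g1, tdc_append b g2, ih (n / b) hnb g1 g2 (by omega) (by omega)]

theorem toDigits_lt10 (n : Nat) (h : n < 10) : Nat.toDigits 10 n = [n.digitChar] := by
  simp [Nat.toDigits, Nat.toDigitsCore, Nat.div_eq_of_lt h, Nat.mod_eq_of_lt h]

theorem toDigits_split (n : Nat) (h : 10 ≤ n) :
    Nat.toDigits 10 n = Nat.toDigits 10 (n / 10) ++ [(n % 10).digitChar] := by
  have hne : n / 10 ≠ 0 := by omega
  show Nat.toDigitsCore 10 (n + 1) n [] = _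
  simp only [Nat.toDigitsCore, hne, if_neg, not_false_iff]
  rw [tdc_append 10 n (n / 10)]
  have : Nat.toDigitsCore 10 n (n / 10) [] = Nat.toDigits 10 (n / 10) := by
    apply tdc_fuel 10 (by norm_num) (n / 10) n (n / 10 + 1)
      (by omega) (by omega)
  rw [this]

theorem digitChar_toNat (d : Nat) (h : d < 10) : (Nat.digitChar d).toNat = d + 48 := by
  interval_cases d <;> decide

theorem fold_toDigits (n : Nat) (h : 1 ≤ n) :
    List.foldl (fun out c => PySem.Int.bor (out <<< (4 : Nat)) ((c.toNat : Int) - 48)) 0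
      (Nat.toDigits 10 n) = ((pvBcd n : Nat) : Int) := by
  induction n using Nat.strong_induction_on with
  | _ n ih =>
    by_cases h10 : n < 10
    · rw [toDigits_lt10 n h10]
      simp only [List.foldl_cons, List.foldl_nil, digitChar_toNat n h10]
      have : ((n + 48 : Nat) : Int) - 48 = ((n : Nat) : Int) := by push_cast; ring
      rw [this]
      have h0 : ((0 : Int) <<< (4 : Nat)) = ((0 : Nat) : Int) := by decide
      rw [h0]
      simp only [PySem.Int.bor, Int.natCast_nonneg, if_pos, Int.toNat_natCast]
      rw [pvBcd_lt10 n h10]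
      simp
    · rw [toDigits_split n (by omega), List.foldl_append,
        ih (n / 10) (Nat.div_lt_self (show 0 < n by omega) (show (1:Nat) < 10 by norm_num)) (by omega)]
      simp only [List.foldl_cons, List.foldl_nil,
        digitChar_toNat (n % 10) (Nat.mod_lt _ (by norm_num))]
      have hc : ((n % 10 + 48 : Nat) : Int) - 48 = ((n % 10 : Nat) : Int) := by push_cast; ring
      rw [hc, ← Int.natCast_shiftLeft]
      simp only [PySem.Int.bor, Int.natCast_nonneg, if_pos, Int.toNat_natCast]
      rw [← Nat.shiftLeft_add_eq_or_of_lt (i := 4) (show n % 10 < 2 ^ 4 by omega),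
        Nat.shiftLeft_eq]
      rw [pvBcd_pos n (by omega)]

theorem to_bcd_alt_eq (v : Int) : to_bcd_alt v = ((pvBcd v.toNat : Nat) : Int) := by
  unfold to_bcd_alt
  by_cases h : v ≤ 0
  · have : v.toNat = 0 := by omega
    simp [h, this, pvBcd]
  · simp only [h, if_neg, not_false_iff]
    rw [PySem.Int.toList_toStr]
    simp only [PySem.Int.toChars, if_neg (by omega : ¬ v < 0)]
    exact fold_toDigits v.toNat (by omega)

-- ===== VERDICT (by name: the statement is the Claim_ definition above) =====
theorem to_bcd_spec : Claim_equal_to_bcd := by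
  intro value _
  unfold Spec_to_bcd
  rw [to_bcd_eq, to_bcd_alt_eq]
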